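-- pv_equiv track=rewrite | github.com/arasandt/PythonScripts | Utils.py | get_process_to_run
-- ===== SOURCE A (Python) =====
-- from collections import OrderedDict
--
-- def get_process_to_run(proceed, process, procname):
--     """
--     """
--
--     if process is None or not proceed:
--         selected_process = OrderedDict({k:v for k,v in procname.items() if v[0]})
--         return selected_process, process
--     else:
--         selected_process = OrderedDict({k:v for k,v in procname.items() if v[0]})
--         if process in list(selected_process.keys()):
--             idx = list(selected_process.keys())
--             idx = idx.index(process)
--             t_dict = OrderedDict({})
--             for count, item in enumerate(selected_process.items()):
--                 if count >= idx:
--                     k,v = item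
--                     t_dict[k] = v
--             selected_process = t_dict
--         return selected_process, None
-- ===== SOURCE B (Python) =====
-- from collections import OrderedDict
--
--
-- def get_process_to_run(proceed, process, procname):
--     # Slicing "from `process` onward" is done with ONE backward pass that fuses
--     # the filter and the cut: walk the items from the END, keep entries whose
--     # v[0] is truthy, and stop as soon as `process` itself is collected, then
--     # reverse.  No filtered dict, no membership test, no index, no flag.
--     if process is None or not proceed:
--         return OrderedDict((k, v) for k, v in procname.items() if v[0]), process
--     out = []
--     for k, v in reversed(list(procname.items())):
--         if v[0]:
--             out.append((k, v))
--             if k == process: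
--                 break
--     return OrderedDict(reversed(out)), None
-- ===== Notes on version B (the rewrite author's own statement) =====
-- stated objective: alternative
-- what changed: B never builds the filtered dict in the active branch: it makes one backward pass over the raw items, fusing the truthiness filter with the cut (stop once the target key is collected), and reverses the collected tail; A's membership test, list.index and enumerate loop all disappear.
import Mathlib
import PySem

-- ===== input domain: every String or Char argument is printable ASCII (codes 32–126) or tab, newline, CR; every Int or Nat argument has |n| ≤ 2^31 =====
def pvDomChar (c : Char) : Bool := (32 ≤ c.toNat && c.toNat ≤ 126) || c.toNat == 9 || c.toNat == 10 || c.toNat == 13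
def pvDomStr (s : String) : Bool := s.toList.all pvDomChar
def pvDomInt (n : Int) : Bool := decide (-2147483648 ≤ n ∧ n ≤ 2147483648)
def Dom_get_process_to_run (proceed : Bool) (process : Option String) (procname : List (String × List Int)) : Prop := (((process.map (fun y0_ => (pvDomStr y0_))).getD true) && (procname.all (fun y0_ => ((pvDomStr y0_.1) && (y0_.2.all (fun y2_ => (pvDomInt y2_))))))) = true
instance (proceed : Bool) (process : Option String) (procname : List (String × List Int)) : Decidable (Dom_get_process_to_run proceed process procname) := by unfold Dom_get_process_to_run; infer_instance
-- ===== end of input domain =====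

-- B replaces A's filter + membership test + list.index + enumerate slicing with one backward
-- pass that fuses the filter with the cut and builds the output back-to-front (objective: alternative).

-- ===== PORT A =====
def get_process_to_run (proceed : Bool) (process : Option String) (procname : List (String × List Int)) : (List (String × List Int)) × Option String :=
  if process.isNone || !proceed then
    let selected_process := procname.filter (fun kv => PySem.List.pyGetD kv.2 0 0 != 0)
    (selected_process, process)
  else
    -- here process = some p (the first branch caught isNone)
    let p := process.getD ""
    let selected_process := procname.filter (fun kv => PySem.List.pyGetD kv.2 0 0 != 0)
    if (selected_process.map Prod.fst).contains p then
      -- list.index: the guard ensures p is present, so the .getD 0 default is never used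
      let idx : Nat := (PySem.List.index? (selected_process.map Prod.fst) p).getD 0
      let t_dict := (PySem.List.enumerate selected_process 0).foldl
        (fun acc ci => if (idx : Int) ≤ ci.1 then acc ++ [ci.2] else acc) []
      (t_dict, none)
    else
      (selected_process, none)

-- ===== PORT B =====
-- B's backward loop with break: collect kept entries, stop once `p` itself was collected.
def pvCollectRev (p : String) : List (String × List Int) → List (String × List Int)
  | [] => []
  | kv :: t =>
    if PySem.List.pyGetD kv.2 0 0 != 0 then
      if kv.1 == p then [kv] else kv :: pvCollectRev p t
    else pvCollectRev p t

def get_process_to_run_alt (proceed : Bool) (process : Option String) (procname : List (String × List Int)) : (List (String × List Int)) × Option String :=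
  if process.isNone || !proceed then
    (procname.filter (fun kv => PySem.List.pyGetD kv.2 0 0 != 0), process)
  else
    ((pvCollectRev (process.getD "") procname.reverse).reverse, none)

-- ===== PRECONDITION & SPEC =====
-- Pre_ excludes exactly (a) the inputs on which Python A raises: an empty value list makes
-- v[0] an IndexError; and (b) association lists with duplicate keys, which a Python dict
-- argument cannot represent at all (dict keys are unique).
def Pre_get_process_to_run (proceed : Bool) (process : Option String) (procname : List (String × List Int)) : Prop :=
  (∀ kv ∈ procname, kv.2 ≠ []) ∧ (procname.map Prod.fst).Nodup
instance (proceed : Bool) (process : Option String) (procname : List (String × List Int)) : Decidable (Pre_get_process_to_run proceed process procname) := by unfold Pre_get_process_to_run; infer_instance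

def pvWitness_get_process_to_run : Bool × Option String × (List (String × List Int)) :=
  (true, some "b", [("a", [1]), ("b", [0, 5]), ("c", [2])])

def Spec_get_process_to_run (proceed : Bool) (process : Option String) (procname : List (String × List Int)) (out : (List (String × List Int)) × Option String) : Prop := out = get_process_to_run_alt proceed process procname
instance (proceed : Bool) (process : Option String) (procname : List (String × List Int)) (out : (List (String × List Int)) × Option String) : Decidable (Spec_get_process_to_run proceed process procname out) := by unfold Spec_get_process_to_run; infer_instance

-- ===== CLAIM (what is proved, stated in full; the proofs are below) =====
def Claim_equal_get_process_to_run : Prop := ∀ (proceed : Bool) (process : Option String) (procname : List (String × List Int)), Dom_get_process_to_run proceed process procname → Pre_get_process_to_run proceed process procname → Spec_get_process_to_run proceed process procname (get_process_to_run proceed process procname)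

-- ===== LEMMAS AND PROOFS =====

-- "take up to and including the first entry keyed p"
def pvTakeUntil (p : String) : List (String × List Int) → List (String × List Int)
  | [] => []
  | kv :: t => if kv.1 == p then [kv] else kv :: pvTakeUntil p t

theorem collectRev_eq_takeUntil (p : String) (m : List (String × List Int)) :
    pvCollectRev p m = pvTakeUntil p (m.filter (fun kv => PySem.List.pyGetD kv.2 0 0 != 0)) := by
  induction m with
  | nil => rfl
  | cons kv t ih =>
    by_cases hf : (PySem.List.pyGetD kv.2 0 0 != 0) = true
    · by_cases hk : (kv.1 == p) = true
      · simp [pvCollectRev, pvTakeUntil, hf, hk]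
      · simp [pvCollectRev, pvTakeUntil, hf, hk, ih]
    · simp [pvCollectRev, hf, ih]

theorem takeUntil_append_of_not_mem (p : String) (m r : List (String × List Int))
    (h : p ∉ m.map Prod.fst) : pvTakeUntil p (m ++ r) = m ++ pvTakeUntil p r := by
  induction m with
  | nil => rfl
  | cons kv t ih =>
    simp only [List.map_cons, List.mem_cons, not_or] at h
    have hk : (kv.1 == p) = false := beq_eq_false_iff_ne.mpr (fun h' => h.1 h'.symm)
    simp only [List.cons_append, pvTakeUntil, hk]
    simp [ih h.2]

theorem takeUntil_of_not_mem (p : String) (m : List (String × List Int))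
    (h : p ∉ m.map Prod.fst) : pvTakeUntil p m = m := by
  simpa [pvTakeUntil] using takeUntil_append_of_not_mem p m [] h

theorem takeUntil_append_of_mem (p : String) (m r : List (String × List Int))
    (h : p ∈ m.map Prod.fst) : pvTakeUntil p (m ++ r) = pvTakeUntil p m := by
  induction m with
  | nil => simp at h
  | cons kv t ih =>
    by_cases hk : (kv.1 == p) = true
    · simp [pvTakeUntil, hk]
    · have : p ∈ t.map Prod.fst := by
        simp only [List.map_cons, List.mem_cons] at h
        rcases h with h | h
        · exact absurd (by simpa [h]) hk
        · exact h
      simp [pvTakeUntil, hk, ih this]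

-- on a nodup-keyed list, the reversed "take back until p" equals the forward suffix from p
theorem rev_takeUntil_rev (p : String) (s : List (String × List Int))
    (hnd : (s.map Prod.fst).Nodup) :
    (pvTakeUntil p s.reverse).reverse =
      if p ∈ s.map Prod.fst then s.dropWhile (fun kv => !(kv.1 == p)) else s := by
  induction s with
  | nil => simp [pvTakeUntil]
  | cons kv t ih =>
    simp only [List.map_cons, List.nodup_cons] at hnd
    by_cases hk : kv.1 = p
    · have hnt : p ∉ t.map Prod.fst := by simpa [hk] using hnd.1
      have hnt' : p ∉ t.reverse.map Prod.fst := by simpa using hnt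
      have : pvTakeUntil p (t.reverse ++ [kv]) = t.reverse ++ pvTakeUntil p [kv] :=
        takeUntil_append_of_not_mem p _ _ hnt'
      simp [List.reverse_cons, this, pvTakeUntil, hk]
    · have hkb : (kv.1 == p) = false := by simpa using hk
      by_cases hm : p ∈ t.map Prod.fst
      · have hm' : p ∈ t.reverse.map Prod.fst := by simpa using hm
        have : pvTakeUntil p (t.reverse ++ [kv]) = pvTakeUntil p t.reverse :=
          takeUntil_append_of_mem p _ _ hm'
        simp [List.reverse_cons, this, ih hnd.2, hm, hkb]
      · have hnt' : p ∉ (t.reverse ++ [kv]).map Prod.fst := by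
          simp only [List.map_append, List.map_reverse, List.map_cons, List.map_nil,
            List.mem_append, List.mem_reverse, List.mem_cons, not_or]
          exact ⟨by simpa using hm, fun h => hk h.symm, by simp⟩
        have hnc : p ∉ (kv :: t).map Prod.fst := by
          simp only [List.map_cons, List.mem_cons, not_or]
          exact ⟨fun h => hk h.symm, hm⟩
        rw [List.reverse_cons, takeUntil_of_not_mem p _ hnt', if_neg hnc]
        simp

-- A's enumerate loop keeps exactly the elements at position ≥ idx
theorem enumFold (idx : Nat) (l : List (String × List Int)) (s : Int) (acc : List (String × List Int)) :
    (PySem.List.enumerate l s).foldl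
        (fun acc ci => if (idx : Int) ≤ ci.1 then acc ++ [ci.2] else acc) acc
      = acc ++ l.drop ((idx : Int) - s).toNat := by
  induction l generalizing s acc with
  | nil => simp [PySem.List.enumerate_nil]
  | cons kv t ih =>
    rw [PySem.List.enumerate_cons]
    by_cases h : (idx : Int) ≤ s
    · have h0 : ((idx : Int) - s).toNat = 0 := by omega
      have h1 : ((idx : Int) - (s + 1)).toNat = 0 := by omega
      simp only [List.foldl_cons, h, if_true, ih, h0, h1]
      simp
    · have h2 : ((idx : Int) - s).toNat = ((idx : Int) - (s + 1)).toNat + 1 := by omega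
      simp only [List.foldl_cons, h, if_false, ih, h2]
      simp

-- dropping to the first index of p is dropWhile (key ≠ p)
theorem drop_index_eq_dropWhile (p : String) (l : List (String × List Int)) (j : Nat)
    (h : PySem.List.index? (l.map Prod.fst) p = some j) :
    l.drop j = l.dropWhile (fun kv => !(kv.1 == p)) := by
  induction l generalizing j with
  | nil => simp [PySem.List.index?] at h
  | cons kv t ih =>
    by_cases hk : kv.1 = p
    · rw [List.map_cons, hk, PySem.List.index?_cons_self] at h
      cases h
      simp [hk]
    · rw [List.map_cons, PySem.List.index?_cons_of_ne _ hk] at h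
      cases hj : PySem.List.index? (t.map Prod.fst) p with
      | none => rw [hj] at h; simp at h
      | some j' =>
        rw [hj] at h
        simp only [Option.map_some] at h
        cases h
        have hb : (kv.1 == p) = false := by simpa using hk
        simp [hb, ih j' hj]

-- ===== VERDICT (by name: the statement is the Claim_ definition above) =====
theorem get_process_to_run_spec : Claim_equal_get_process_to_run := by
  intro proceed process procname _hDom hPre
  unfold Spec_get_process_to_run get_process_to_run get_process_to_run_alt
  dsimp only
  by_cases hb : (process.isNone || !proceed) = true
  · rw [if_pos hb, if_pos hb]
  · rw [if_neg hb, if_neg hb]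
    set p := process.getD "" with hp
    set sel := procname.filter (fun kv => PySem.List.pyGetD kv.2 0 0 != 0) with hsel
    have hnd : (sel.map Prod.fst).Nodup :=
      hPre.2.sublist (List.Sublist.map Prod.fst List.filter_sublist)
    have hBside : (pvCollectRev p procname.reverse).reverse =
        if p ∈ sel.map Prod.fst then sel.dropWhile (fun kv => !(kv.1 == p)) else sel := by
      rw [collectRev_eq_takeUntil, List.filter_reverse, ← hsel]
      exact rev_takeUntil_rev p sel hnd
    by_cases hc : ((sel.map Prod.fst).contains p) = true
    · have hmem : p ∈ sel.map Prod.fst := by simpa using hc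
      obtain ⟨j, hj⟩ := Option.isSome_iff_exists.mp
        ((PySem.List.index?_isSome_iff _ _).mpr hmem)
      have h2 : (PySem.List.index? (sel.map Prod.fst) p).getD 0 = j := by rw [hj]; rfl
      rw [if_pos hc, hBside, if_pos hmem, h2, enumFold j sel 0]
      have h0 : ((j : Int) - 0).toNat = j := by omega
      rw [h0, drop_index_eq_dropWhile p sel j hj]
      simp
    · have hmem : p ∉ sel.map Prod.fst := by simpa using hc
      rw [if_neg hc, hBside, if_neg hmem]
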